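-- pv_equiv track=rewrite | github.com/qqaazz0222/CodingTest | PCCP/PCCP실전모의고사1회1번.py | solution
-- ===== SOURCE A (Python) =====
-- import collections
--
-- def solution(input_string):
--     answer = ''
--     temp = []
--     sH = collections.defaultdict(int)
--     prev = None
--     for cur in input_string:
--         if prev != cur:
--             sH[cur] += 1
--         prev = cur
--     for x in sH:
--         if sH[x] >= 2:
--             temp.append(x)
--     if len(temp) == 0:
--         answer = "N"
--     else:
--         temp.sort()
--         for s in temp:
--             answer += s
--     return answer
-- ===== SOURCE B (Python) =====
-- def solution(input_string):
--     pos = {}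
--     for i, ch in enumerate(input_string):
--         pos.setdefault(ch, []).append(i)
--     result = sorted(ch for ch, ps in pos.items()
--                     if any(b - a > 1 for a, b in zip(ps, ps[1:])))
--     return ''.join(result) or 'N'
-- ===== Notes on version B (the rewrite author's own statement) =====
-- stated objective: alternative
-- what changed: B replaces A's run-boundary counting pass (prev/cur comparison feeding a defaultdict of run-start counts) with a position-index table: one pass records each character's occurrence indices, and a character qualifies iff its index list has a gap (consecutive indices differing by more than 1).
import Mathlib
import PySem

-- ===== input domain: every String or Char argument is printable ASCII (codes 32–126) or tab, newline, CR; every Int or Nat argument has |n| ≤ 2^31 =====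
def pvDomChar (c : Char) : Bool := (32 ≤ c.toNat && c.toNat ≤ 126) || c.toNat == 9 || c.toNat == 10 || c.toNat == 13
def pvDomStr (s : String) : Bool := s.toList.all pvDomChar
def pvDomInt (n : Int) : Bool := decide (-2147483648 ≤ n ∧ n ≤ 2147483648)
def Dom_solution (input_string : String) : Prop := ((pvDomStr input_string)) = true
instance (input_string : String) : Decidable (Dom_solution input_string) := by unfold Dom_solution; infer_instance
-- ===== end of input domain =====

-- B builds a per-character occurrence-index table and tests for a gap between consecutive
-- indices, instead of A's prev/cur run-boundary counting; alternative decomposition, same cost.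

-- ===== PORT A =====
def solution (input_string : String) : String :=
  let st := input_string.toList.foldl
    (fun (st : Option Char × PySem.Dict Char Int) cur =>
      (some cur, if st.1 ≠ some cur then st.2.modify cur 0 (· + 1) else st.2))
    (none, PySem.Dict.empty)
  let sH := st.2
  let temp := sH.keys.foldl (fun t x => if 2 ≤ sH.getD x 0 then t ++ [x] else t) []
  if temp.length = 0 then "N"
  else String.ofList ((PySem.List.sorted temp (fun x => x)).foldl (fun acc s => acc ++ [s]) [])

-- ===== PORT B =====
-- any(b - a > 1 for a, b in zip(ps, ps[1:]))
def hasGapB (ps : List Int) : Bool :=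
  (ps.zip ps.tail).any (fun q => 1 < q.2 - q.1)

def solution_alt (input_string : String) : String :=
  let pos := (PySem.List.enumerate input_string.toList).foldl
    (fun (d : PySem.Dict Char (List Int)) p => d.modify p.2 [] (· ++ [p.1]))
    PySem.Dict.empty
  let result := PySem.List.sorted ((pos.items.filter (fun p => hasGapB p.2)).map (fun p => p.1)) (fun x => x)
  if result = [] then "N" else String.ofList result

-- ===== PRECONDITION & SPEC =====
def Spec_solution (input_string : String) (out : String) : Prop := out = solution_alt input_string
instance (input_string : String) (out : String) : Decidable (Spec_solution input_string out) := by unfold Spec_solution; infer_instance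

-- ===== CLAIM (what is proved, stated in full; the proofs are below) =====
def Claim_equal_solution : Prop := ∀ (input_string : String), Dom_solution input_string → Spec_solution input_string (solution input_string)

-- ===== LEMMAS AND PROOFS =====

-- the characters standing at run starts (prev ≠ cur), in order, given the previous character
def rsList : Option Char → List Char → List Char
  | _, [] => []
  | p, c :: t => (if p ≠ some c then [c] else []) ++ rsList (some c) t

-- A's loop state: the dict is exactly a count fold over the run-start characters
theorem foldA_eq (l : List Char) (p : Option Char) (d : PySem.Dict Char Int) :
    (l.foldl (fun (st : Option Char × PySem.Dict Char Int) cur =>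
      (some cur, if st.1 ≠ some cur then st.2.modify cur 0 (· + 1) else st.2)) (p, d)).2
    = (rsList p l).foldl (fun d c => d.modify c 0 (· + 1)) d := by
  induction l generalizing p d with
  | nil => rfl
  | cons c t ih =>
    by_cases h : p = some c
    · have h2 := ih (some c) d
      simp [rsList, h] at h2 ⊢
      exact h2
    · have h2 := ih (some c) (d.modify c 0 (· + 1))
      simp [rsList, h] at h2 ⊢
      exact h2

-- number of runs of character c, given whether the previous character was c
def runsAux (c : Char) : Bool → List Char → Nat
  | _, [] => 0
  | b, x :: t => (if x = c ∧ b = false then 1 else 0) + runsAux c (decide (x = c)) t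

theorem count_rsList (c : Char) (l : List Char) (p : Option Char) :
    (rsList p l).count c = runsAux c (decide (p = some c)) l := by
  induction l generalizing p with
  | nil => simp [rsList, runsAux]
  | cons x t ih =>
    by_cases hx : x = c
    · subst hx
      by_cases hp : p = some x
      · simp [rsList, runsAux, hp, ih]
      · simp [rsList, runsAux, hp, ih]
        omega
    · by_cases hp : p = some x <;>
        simp [rsList, runsAux, hp, hx, ih]


theorem runsAux_false_pos (c : Char) (l : List Char) :
    1 ≤ runsAux c false l ↔ c ∈ l := by
  induction l with
  | nil => simp [runsAux]
  | cons x t ih =>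
    by_cases hx : x = c
    · subst hx; simp [runsAux]
    · simp [runsAux, hx, ih, Ne.symm hx]

-- occurrence positions of c in l, counted from n
def posF (c : Char) (n : Int) (l : List Char) : List Int :=
  ((PySem.List.enumerate l n).filter (fun p => p.2 == c)).map (fun p => p.1)

theorem posF_nil (c : Char) (n : Int) : posF c n [] = [] := rfl

theorem posF_cons (c : Char) (n : Int) (x : Char) (t : List Char) :
    posF c n (x :: t) = if x = c then n :: posF c (n+1) t else posF c (n+1) t := by
  by_cases hx : x = c <;> simp [posF, PySem.List.enumerate_cons, hx]

theorem posF_ge (c : Char) (l : List Char) : ∀ (n : Int), ∀ i ∈ posF c n l, n ≤ i := by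
  induction l with
  | nil => intro n i hi; simp [posF_nil] at hi
  | cons x t ih =>
    intro n i hi
    rw [posF_cons] at hi
    by_cases hx : x = c
    · rw [if_pos hx] at hi
      rcases List.mem_cons.mp hi with h | h
      · omega
      · have := ih (n+1) i h; omega
    · rw [if_neg hx] at hi
      have := ih (n+1) i hi; omega

theorem posF_eq_nil_iff (c : Char) (l : List Char) :
    ∀ (n : Int), posF c n l = [] ↔ c ∉ l := by
  induction l with
  | nil => intro n; simp [posF_nil]
  | cons x t ih =>
    intro n
    by_cases hx : x = c
    · subst hx; simp [posF_cons]
    · simp [posF_cons, hx, ih (n+1), Ne.symm hx]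

theorem hasGapB_cons_cons (a b : Int) (r : List Int) :
    hasGapB (a :: b :: r) = (decide (1 < b - a) || hasGapB (b :: r)) := by
  simp [hasGapB, List.zip_cons_cons]

theorem gap_virtual (c : Char) (l : List Char) : ∀ (n : Int),
    hasGapB (n :: posF c (n+1) l) = decide (1 ≤ runsAux c true l) := by
  induction l with
  | nil => intro n; simp [posF_nil, hasGapB, runsAux]
  | cons x t ih =>
    intro n
    by_cases hx : x = c
    · subst hx
      rw [posF_cons, if_pos rfl, hasGapB_cons_cons]
      rw [ih (n+1)]
      simp [runsAux]
    · rw [posF_cons, if_neg hx]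
      rcases hq : posF c (n+1+1) t with _ | ⟨i, r⟩
      · have hc : c ∉ t := (posF_eq_nil_iff c t (n+1+1)).mp hq
        have hn : ¬ (1 ≤ runsAux c false t) := fun h => hc ((runsAux_false_pos c t).mp h)
        simp [hasGapB, runsAux, hx, hn]
      · have hi : n+1+1 ≤ i := posF_ge c t (n+1+1) i (by rw [hq]; exact List.mem_cons_self)
        have hgt : 1 < i - n := by omega
        have hc : c ∈ t := by
          by_contra hc
          rw [(posF_eq_nil_iff c t (n+1+1)).mpr hc] at hq
          simp at hq
        have h1 : 1 ≤ runsAux c false t := (runsAux_false_pos c t).mpr hc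
        rw [hasGapB_cons_cons]
        simp [hgt, runsAux, hx, h1]

theorem gap_main (c : Char) (l : List Char) : ∀ (n : Int),
    hasGapB (posF c n l) = decide (2 ≤ runsAux c false l) := by
  induction l with
  | nil => intro n; simp [posF_nil, hasGapB, runsAux]
  | cons x t ih =>
    intro n
    by_cases hx : x = c
    · subst hx
      rw [posF_cons, if_pos rfl, gap_virtual]
      have h2 : (1 ≤ runsAux x true t) ↔ (2 ≤ 1 + runsAux x true t) := by omega
      simp [runsAux, h2]
    · rw [posF_cons, if_neg hx, ih (n+1)]
      simp [runsAux, hx]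

theorem ports_eq (s : String) : solution s = solution_alt s := by
  simp only [solution, solution_alt]
  set l := s.toList with hl
  set dA := (l.foldl (fun (st : Option Char × PySem.Dict Char Int) cur =>
      (some cur, if st.1 ≠ some cur then st.2.modify cur 0 (· + 1) else st.2))
    (none, PySem.Dict.empty)).2 with hdA
  set dB := (PySem.List.enumerate l 0).foldl
    (fun (d : PySem.Dict Char (List Int)) p => d.modify p.2 [] (· ++ [p.1]))
    PySem.Dict.empty with hdB
  -- A-side dict characterisation
  have hdAval : ∀ c, dA.getD c 0 = ((rsList none l).count c : Int) := by
    intro c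
    rw [hdA, foldA_eq, PySem.Dict.getD_foldl_modify_add_one]
    simp
  have hdAkeys : dA.keys = PySem.Set.update ([] : List Char) (rsList none l) := by
    rw [hdA, foldA_eq]
    have := PySem.Dict.keys_foldl_modify (rsList none l) (0 : Int)
      (fun _ _ => (· + 1)) PySem.Dict.empty
    simpa [PySem.Dict.keys_empty] using this
  have hdAnodup : dA.keys.Nodup := by
    rw [hdAkeys]; exact PySem.Set.nodup_update _ _ List.nodup_nil
  -- B-side dict characterisation
  have hdBval : ∀ c, dB.getD c [] = posF c 0 l := by
    intro c
    have hsw : dB = ((PySem.List.enumerate l 0).map Prod.swap).foldl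
        (fun (d : PySem.Dict Char (List Int)) q => d.modify q.1 [] (· ++ [q.2]))
        PySem.Dict.empty := by
      rw [hdB, List.foldl_map]
      rfl
    rw [hsw, PySem.Dict.getD_foldl_modify_append]
    simp only [PySem.Dict.getD_empty, List.nil_append, List.filter_map, List.map_map]
    rfl
  have hdBkeys : dB.keys = PySem.Set.update ([] : List Char) l := by
    rw [hdB]
    have := PySem.Dict.keys_foldl_modify_key (PySem.List.enumerate l 0)
      (fun p => p.2) ([] : List Int) (fun _ p => (· ++ [p.1])) PySem.Dict.empty
    simpa [PySem.Dict.keys_empty, PySem.List.map_snd_enumerate] using this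
  have hdBnodup : dB.keys.Nodup := by
    rw [hdBkeys]; exact PySem.Set.nodup_update _ _ List.nodup_nil
  -- the two filtered lists
  set LA := dA.keys.foldl (fun t x => if 2 ≤ dA.getD x 0 then t ++ [x] else t) [] with hLA
  set LB := ((dB.items.filter (fun p => hasGapB p.2)).map (fun p => p.1)) with hLB
  have hLAfilter : LA = dA.keys.filter (fun x => decide (2 ≤ dA.getD x 0)) := by
    rw [hLA]
    have hstep : (fun (t : List Char) (x : Char) => if 2 ≤ dA.getD x 0 then t ++ [x] else t)
        = (fun t x => if (fun y => decide (2 ≤ dA.getD y 0)) x = true then t ++ [id x] else t) := by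
      funext t x; simp
    rw [hstep, PySem.List.foldl_append_if]
    simp
  have hLBfilter : LB = dB.keys.filter (fun k => hasGapB (dB.getD k [])) := by
    rw [hLB, PySem.Dict.items_eq_map_keys dB hdBnodup ([] : List Int), List.filter_map,
      List.map_map]
    simp [Function.comp_def]
  -- membership characterisations
  have hmemLA : ∀ x, x ∈ LA ↔ 2 ≤ runsAux x false l := by
    intro x
    have hcnt : (rsList none l).count x = runsAux x false l := by
      have := count_rsList x l none
      simpa using this
    rw [hLAfilter, List.mem_filter, hdAkeys, PySem.Set.mem_update]
    constructor
    · rintro ⟨-, h2⟩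
      rw [decide_eq_true_iff, hdAval, hcnt] at h2
      exact_mod_cast h2
    · intro h2
      refine ⟨Or.inr ?_, ?_⟩
      · have : 0 < (rsList none l).count x := by omega
        exact List.count_pos_iff.mp this
      · rw [decide_eq_true_iff, hdAval, hcnt]
        exact_mod_cast h2
  have hmemLB : ∀ x, x ∈ LB ↔ 2 ≤ runsAux x false l := by
    intro x
    rw [hLBfilter, List.mem_filter, hdBkeys, PySem.Set.mem_update, hdBval, gap_main,
      decide_eq_true_iff]
    constructor
    · rintro ⟨-, h2⟩; exact h2
    · intro h2
      refine ⟨Or.inr ?_, h2⟩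
      exact (runsAux_false_pos x l).mp (by omega)
  -- nodup and permutation
  have hnodLA : LA.Nodup := by rw [hLAfilter]; exact List.Nodup.filter _ hdAnodup
  have hnodLB : LB.Nodup := by rw [hLBfilter]; exact List.Nodup.filter _ hdBnodup
  have hperm : LA.Perm LB :=
    (List.perm_ext_iff_of_nodup hnodLA hnodLB).mpr
      (fun a => (hmemLA a).trans (hmemLB a).symm)
  have hsorted : PySem.List.sorted LA (fun x => x) = PySem.List.sorted LB (fun x => x) :=
    PySem.List.sorted_eq_sorted_of_perm LA LB (fun x => x) (fun _ _ h => h) hperm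
  -- final assembly
  rw [PySem.List.foldl_append_singleton, List.nil_append, hsorted]
  by_cases h : LA = []
  · have hb : LB = [] := List.Perm.eq_nil (h ▸ hperm).symm
    simp [h, hb, PySem.List.sorted_eq_nil_iff]
  · have hb : LB ≠ [] := fun hB => h (List.Perm.eq_nil (hB ▸ hperm))
    have h1 : ¬ (LA.length = 0) := fun hh => h (List.length_eq_zero_iff.mp hh)
    have h2 : ¬ (PySem.List.sorted LB (fun x => x) = []) := by
      rw [PySem.List.sorted_eq_nil_iff]; exact hb
    simp [h1, h2]

-- ===== VERDICT (by name: the statement is the Claim_ definition above) =====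
theorem solution_spec : Claim_equal_solution := by
  intro s _
  unfold Spec_solution
  exact ports_eq s
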